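-- pv_equiv track=rewrite | github.com/salmatx/BMS-LTC6804 | tools/telemetry-parser/parse_telemetry.py | parse_cell_flags
-- ===== SOURCE A (Python) =====
-- def parse_cell_flags(raw: int) -> str:
--     lines = []
--     for cell in range(1, 13):
--         bit_offset = (cell - 1) * 2
--         uv = (raw >> bit_offset) & 1
--         ov = (raw >> (bit_offset + 1)) & 1
--         flags = []
--         if uv:
--             flags.append("UV")
--         if ov:
--             flags.append("OV")
--         status = ", ".join(flags) if flags else "OK"
--         lines.append(f"    Cell {cell:2d}: {status}")
--     return "\n".join(lines)
-- ===== SOURCE B (Python) =====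
-- _STATUS = {0: "OK", 1: "UV", 2: "OV", 3: "UV, OV"}
--
-- def parse_cell_flags(raw: int) -> str:
--     return "\n".join(
--         f"    Cell {cell:2d}: {_STATUS[(raw >> ((cell - 1) * 2)) & 3]}"
--         for cell in range(1, 13)
--     )
-- ===== Notes on version B (the rewrite author's own statement) =====
-- stated objective: simpler
-- what changed: Replaces the per-cell flag-list building (two conditionals, append, conditional join) by a constant lookup table from each cell's two-bit UV/OV code to its status string, emitting the lines as a comprehension.
import Mathlib
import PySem

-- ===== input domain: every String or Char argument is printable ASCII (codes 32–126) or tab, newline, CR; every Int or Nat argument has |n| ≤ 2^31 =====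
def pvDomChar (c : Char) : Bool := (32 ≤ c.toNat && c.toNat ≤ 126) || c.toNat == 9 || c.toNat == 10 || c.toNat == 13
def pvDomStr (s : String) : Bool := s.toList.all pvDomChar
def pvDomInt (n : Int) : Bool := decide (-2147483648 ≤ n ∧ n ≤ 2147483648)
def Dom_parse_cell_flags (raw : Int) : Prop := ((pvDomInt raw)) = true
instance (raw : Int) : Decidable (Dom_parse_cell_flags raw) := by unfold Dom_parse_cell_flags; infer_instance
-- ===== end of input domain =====

-- B replaces A's per-cell flag-list building and conditional join by a constant
-- 2-bit-code → status table and a comprehension (objective: simpler).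

-- f"{cell:2d}": right-align in width 2 (exact for the nonnegative cells 1..12 used here)
def pvFmt2 (cell : Int) : String :=
  let s := PySem.Int.toStr cell
  if PySem.Str.len s < 2 then " " ++ s else s

-- ===== PORT A =====
def parse_cell_flags (raw : Int) : String :=
  let lines := (PySem.List.pyRange 1 13 1).foldl (fun (lines : List String) (cell : Int) =>
    let bit_offset := (cell - 1) * 2
    -- raw >> bit_offset: bit_offset = (cell-1)*2 ≥ 0 for cell ∈ 1..12, so .toNat is exact
    let uv := PySem.Int.band (raw >>> bit_offset.toNat) 1
    let ov := PySem.Int.band (raw >>> (bit_offset + 1).toNat) 1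
    let flags : List String := []
    let flags := if uv ≠ 0 then flags ++ ["UV"] else flags
    let flags := if ov ≠ 0 then flags ++ ["OV"] else flags
    let status := if flags ≠ [] then PySem.Str.join ", " flags else "OK"
    lines ++ ["    Cell " ++ pvFmt2 cell ++ ": " ++ status]) []
  PySem.Str.join "\n" lines

-- ===== PORT B =====
def pvSTATUS : PySem.Dict Int String :=
  PySem.Dict.ofList [(0, "OK"), (1, "UV"), (2, "OV"), (3, "UV, OV")]

def parse_cell_flags_alt (raw : Int) : String :=
  PySem.Str.join "\n" ((PySem.List.pyRange 1 13 1).map (fun cell =>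
    -- _STATUS[code]: code = (raw >> 2(cell-1)) & 3 ∈ {0,1,2,3}, so the lookup never misses
    -- and the .getD "" default never fires
    "    Cell " ++ pvFmt2 cell ++ ": " ++
      PySem.Dict.getD pvSTATUS (PySem.Int.band (raw >>> ((cell - 1) * 2).toNat) 3) ""))

-- ===== PRECONDITION & SPEC =====
def Spec_parse_cell_flags (raw : Int) (out : String) : Prop := out = parse_cell_flags_alt raw
instance (raw : Int) (out : String) : Decidable (Spec_parse_cell_flags raw out) := by unfold Spec_parse_cell_flags; infer_instance

-- ===== CLAIM (what is proved, stated in full; the proofs are below) =====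
def Claim_equal_parse_cell_flags : Prop := ∀ (raw : Int), Dom_parse_cell_flags raw → Spec_parse_cell_flags raw (parse_cell_flags raw)

-- ===== LEMMAS AND PROOFS =====

-- Python x & 3 is x mod 4 (divisor 4 > 0, so floor mod = Int.emod)
theorem pv_band_three (x : Int) : PySem.Int.band x 3 = x % 4 := by
  have h3 : ∀ n : Nat, n &&& 3 = n % 4 := by
    intro n
    have h : (3 : Nat) = 2 ^ 2 - 1 := rfl
    rw [h, Nat.and_two_pow_sub_one_eq_mod]
  have h3' : ∀ n : Nat, 3 &&& n = n % 4 := fun n => by rw [Nat.land_comm]; exact h3 n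
  have ht : ((3 : Int)).toNat = 3 := rfl
  unfold PySem.Int.band
  split_ifs with h1 h2 h2
  · rw [ht, h3 _]; omega
  · omega
  · rw [ht, h3' _]; omega
  · omega

theorem pv_band_one' (x : Int) : PySem.Int.band x 1 = x % 2 := by
  rw [PySem.Int.band_one, PySem.Int.mod_eq_emod_of_pos (by norm_num)]

-- per-cell core: A's flag-branch status from the two bits equals B's table entry for the 2-bit code
theorem pv_cell_status (x : Int) :
    (if (if PySem.Int.band (x >>> (1 : Nat)) 1 ≠ 0 then
            (if PySem.Int.band x 1 ≠ 0 then ["UV"] else []) ++ ["OV"]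
          else if PySem.Int.band x 1 ≠ 0 then ["UV"] else []) ≠ ([] : List String) then
        PySem.Str.join ", "
          (if PySem.Int.band (x >>> (1 : Nat)) 1 ≠ 0 then
            (if PySem.Int.band x 1 ≠ 0 then ["UV"] else []) ++ ["OV"]
          else if PySem.Int.band x 1 ≠ 0 then ["UV"] else [])
      else "OK")
      = PySem.Dict.getD pvSTATUS (PySem.Int.band x 3) "" := by
  have hs : x >>> (1 : Nat) = x / 2 := by
    rw [Int.shiftRight_eq_div_pow]; norm_num
  simp only [pv_band_one', pv_band_three, hs]
  have h4 : x % 4 = 0 ∨ x % 4 = 1 ∨ x % 4 = 2 ∨ x % 4 = 3 := by omega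
  rcases h4 with h | h | h | h
  · rw [h, show x % 2 = 0 from by omega, show (x / 2) % 2 = 0 from by omega]; decide
  · rw [h, show x % 2 = 1 from by omega, show (x / 2) % 2 = 0 from by omega]; decide
  · rw [h, show x % 2 = 0 from by omega, show (x / 2) % 2 = 1 from by omega]; decide
  · rw [h, show x % 2 = 1 from by omega, show (x / 2) % 2 = 1 from by omega]; decide

theorem pv_shift_succ (raw : Int) (k : Nat) : raw >>> (k + 1) = (raw >>> k) >>> (1 : Nat) :=
  Int.shiftRight_add raw k 1

theorem parse_cell_flags_spec : Claim_equal_parse_cell_flags := by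
  intro raw _
  unfold Spec_parse_cell_flags parse_cell_flags parse_cell_flags_alt
  have hr : PySem.List.pyRange 1 13 1 = [1, 2, 3, 4, 5, 6, 7, 8, 9, 10, 11, 12] := by decide
  rw [hr]
  simp only [List.foldl, List.map, List.nil_append,
      show (((1:Int)-1)*2).toNat = 0 from rfl, show (((1:Int)-1)*2+1).toNat = 1 from rfl,
      show (((2:Int)-1)*2).toNat = 2 from rfl, show (((2:Int)-1)*2+1).toNat = 3 from rfl,
      show (((3:Int)-1)*2).toNat = 4 from rfl, show (((3:Int)-1)*2+1).toNat = 5 from rfl,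
      show (((4:Int)-1)*2).toNat = 6 from rfl, show (((4:Int)-1)*2+1).toNat = 7 from rfl,
      show (((5:Int)-1)*2).toNat = 8 from rfl, show (((5:Int)-1)*2+1).toNat = 9 from rfl,
      show (((6:Int)-1)*2).toNat = 10 from rfl, show (((6:Int)-1)*2+1).toNat = 11 from rfl,
      show (((7:Int)-1)*2).toNat = 12 from rfl, show (((7:Int)-1)*2+1).toNat = 13 from rfl,
      show (((8:Int)-1)*2).toNat = 14 from rfl, show (((8:Int)-1)*2+1).toNat = 15 from rfl,
      show (((9:Int)-1)*2).toNat = 16 from rfl, show (((9:Int)-1)*2+1).toNat = 17 from rfl,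
      show (((10:Int)-1)*2).toNat = 18 from rfl, show (((10:Int)-1)*2+1).toNat = 19 from rfl,
      show (((11:Int)-1)*2).toNat = 20 from rfl, show (((11:Int)-1)*2+1).toNat = 21 from rfl,
      show (((12:Int)-1)*2).toNat = 22 from rfl, show (((12:Int)-1)*2+1).toNat = 23 from rfl,
      Int.shiftRight_zero]
  rw [pv_shift_succ raw 2, pv_shift_succ raw 4, pv_shift_succ raw 6, pv_shift_succ raw 8, pv_shift_succ raw 10, pv_shift_succ raw 12, pv_shift_succ raw 14, pv_shift_succ raw 16, pv_shift_succ raw 18, pv_shift_succ raw 20, pv_shift_succ raw 22]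
  rw [pv_cell_status raw, pv_cell_status (raw >>> (2 : Nat)), pv_cell_status (raw >>> (4 : Nat)), pv_cell_status (raw >>> (6 : Nat)), pv_cell_status (raw >>> (8 : Nat)), pv_cell_status (raw >>> (10 : Nat)), pv_cell_status (raw >>> (12 : Nat)), pv_cell_status (raw >>> (14 : Nat)), pv_cell_status (raw >>> (16 : Nat)), pv_cell_status (raw >>> (18 : Nat)), pv_cell_status (raw >>> (20 : Nat)), pv_cell_status (raw >>> (22 : Nat))]
  simp only [List.cons_append, List.nil_append]
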